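-- pv_equiv track=rewrite | github.com/stokovich/Fundamentals | lists_advanced/palindrome_strings.py | find_palindromes
-- ===== SOURCE A (Python) =====
-- def find_palindromes(lst: list, word):
--     palindromes = []
--     for element in lst:
--         curr_list = [x for x in element]
--         reverse_list = list(curr_list.__reversed__())
--
--         if curr_list == reverse_list:
--             palindromes.append(element)
--
--     word_count = palindromes.count(word)
--
--     return palindromes, word_count
-- ===== SOURCE B (Python) =====
-- def find_palindromes(lst: list, word):
--     palindromes = []
--     count = 0
--     for element in lst:
--         # two-pointer palindrome test: compare ends moving inward, no reversed copy
--         i, j = 0, len(element) - 1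
--         ok = True
--         while i < j:
--             if element[i] != element[j]:
--                 ok = False
--                 break
--             i += 1
--             j -= 1
--         if ok:
--             palindromes.append(element)
--             if element == word:
--                 count += 1
--     return palindromes, count
-- ===== Notes on version B (the rewrite author's own statement) =====
-- stated objective: faster
-- what changed: Replaces A's reversed-copy comparison (build char list, build its reverse, compare whole lists) with an in-place two-pointer scan that compares ends moving inward and exits on the first mismatch, and fuses A's separate palindromes.count(word) pass into an accumulator in the single loop.
import Mathlib
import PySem

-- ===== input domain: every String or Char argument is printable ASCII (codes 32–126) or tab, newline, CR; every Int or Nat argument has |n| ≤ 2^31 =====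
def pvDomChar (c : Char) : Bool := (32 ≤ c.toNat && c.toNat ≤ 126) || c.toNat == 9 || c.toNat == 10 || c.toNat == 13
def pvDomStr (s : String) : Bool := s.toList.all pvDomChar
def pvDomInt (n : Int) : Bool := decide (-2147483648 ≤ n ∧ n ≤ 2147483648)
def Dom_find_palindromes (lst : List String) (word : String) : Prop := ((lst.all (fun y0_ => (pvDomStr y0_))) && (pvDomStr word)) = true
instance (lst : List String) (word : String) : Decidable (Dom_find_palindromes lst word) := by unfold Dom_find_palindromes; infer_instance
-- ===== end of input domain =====

-- B replaces A's reversed-copy list comparison with an in-place two-pointer scan (early exit)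
-- and fuses A's separate palindromes.count(word) pass into an accumulator in the single loop.

-- ===== PORT A =====
def find_palindromes (lst : List String) (word : String) : List String × Int :=
  let palindromes := lst.foldl (fun pals element =>
    let curr_list := element.toList
    let reverse_list := curr_list.reverse
    if curr_list == reverse_list then pals ++ [element] else pals) []
  let word_count : Int := (PySem.List.count palindromes word : Int)
  (palindromes, word_count)

-- ===== PORT B =====
-- two-pointer scan: `while i < j: if s[i] != s[j]: False; i += 1; j -= 1`.
-- For the empty string Python starts with j = -1 and the loop body never runs;
-- here j = 0 - 1 = 0 in Nat and with i = 0 the loop body likewise never runs: same result.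
def twoPtrPal (cs : List Char) (i j : Nat) : Bool :=
  if i < j then
    if cs.getD i ' ' != cs.getD j ' ' then false
    else twoPtrPal cs (i + 1) (j - 1)
  else true
termination_by j - i

def find_palindromes_alt (lst : List String) (word : String) : List String × Int :=
  lst.foldl (fun (s : List String × Int) element =>
    let cs := element.toList
    if twoPtrPal cs 0 (cs.length - 1) then
      (s.1 ++ [element], if element == word then s.2 + 1 else s.2)
    else s) ([], 0)

-- ===== PRECONDITION & SPEC =====
def Spec_find_palindromes (lst : List String) (word : String) (out : List String × Int) : Prop := out = find_palindromes_alt lst word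
instance (lst : List String) (word : String) (out : List String × Int) : Decidable (Spec_find_palindromes lst word out) := by unfold Spec_find_palindromes; infer_instance

-- ===== CLAIM =====
def Claim_equal_find_palindromes : Prop := ∀ (lst : List String) (word : String), Dom_find_palindromes lst word → Spec_find_palindromes lst word (find_palindromes lst word)

-- ===== LEMMAS AND PROOFS =====

-- the two-pointer scan checks exactly the mirrored-position equations
lemma twoPtrPal_true_iff (cs : List Char) (i j : Nat) :
    twoPtrPal cs i j = true ↔
      ∀ k, i ≤ k → k ≤ j → cs.getD k ' ' = cs.getD (i + j - k) ' ' := by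
  fun_induction twoPtrPal cs i j with
  | case1 i j hlt hne =>
    simp only [bne_iff_ne, ne_eq] at hne
    constructor
    · intro h; exact absurd h (by simp)
    · intro h
      have := h i (le_refl i) (by omega)
      have hij : i + j - i = j := by omega
      rw [hij] at this
      exact absurd this hne
  | case2 i j hlt hne ih =>
    simp only [bne_iff_ne, ne_eq, not_not] at hne
    rw [ih]
    constructor
    · intro h k hk1 hk2
      rcases Nat.lt_or_ge k j with hkj | hkj
      · rcases Nat.lt_or_ge i k with hik | hik
        · have := h k (by omega) (by omega)
          have he : i + 1 + (j - 1) = i + j := by omega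
          rwa [he] at this
        · have hki : k = i := by omega
          subst hki
          have hij : k + j - k = j := by omega
          rw [hij]; exact hne
      · have hkj' : k = j := by omega
        subst hkj'
        have hij : i + k - k = i := by omega
        rw [hij]; exact hne.symm
    · intro h k hk1 hk2
      have := h k (by omega) (by omega)
      have he : i + 1 + (j - 1) = i + j := by omega
      rw [he]
      exact this
  | case3 i j hlt =>
    constructor
    · intro _ k hk1 hk2
      have hki : k = i ∧ i = j ∨ i > j := by omega
      rcases hki with ⟨h1, h2⟩ | h3
      · subst h1; subst h2
        congr 1; omega
      · omega
    · intro _; rfl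

-- the two-pointer scan from the ends decides palindromicity
lemma twoPtrPal_eq_reverse (cs : List Char) :
    twoPtrPal cs 0 (cs.length - 1) = (cs == cs.reverse) := by
  rcases cs with _ | ⟨c, cs'⟩
  · simp [twoPtrPal]
  · have hn : (c :: cs').length = cs'.length + 1 := by simp
    rw [Bool.eq_iff_iff, twoPtrPal_true_iff, beq_iff_eq]
    constructor
    · intro h
      apply List.ext_getElem (by simp)
      intro m hm hm'
      rw [List.getElem_reverse]
      have hk := h m (by omega) (by omega)
      rw [List.getD_eq_getElem _ _ (by omega), List.getD_eq_getElem _ _ (by omega)] at hk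
      have e1 : 0 + ((c :: cs').length - 1) - m = (c :: cs').length - 1 - m := by omega
      simpa [e1] using hk
    · intro h k _ hk2
      rw [List.getD_eq_getElem _ _ (by omega), List.getD_eq_getElem _ _ (by omega)]
      have hg := List.getElem_reverse (l := c :: cs') (i := k)
        (by rw [List.length_reverse]; omega)
      simp only [← h] at hg
      have e1 : 0 + ((c :: cs').length - 1) - k = (c :: cs').length - 1 - k := by omega
      simp only [e1]
      exact hg

def pvIsPal (e : String) : Bool := e.toList == e.toList.reverse

lemma foldA_eq (lst : List String) (acc : List String) :
    lst.foldl (fun pals element =>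
      let curr_list := element.toList
      let reverse_list := curr_list.reverse
      if curr_list == reverse_list then pals ++ [element] else pals) acc
    = acc ++ lst.filter pvIsPal := by
  induction lst generalizing acc with
  | nil => simp
  | cons x xs ih =>
    simp only [List.foldl_cons, List.filter_cons, pvIsPal, beq_iff_eq] at *
    by_cases h : x.toList = x.toList.reverse
    · simp only [if_pos h, ih, List.append_assoc, List.singleton_append]
    · simp only [if_neg h, ih]

lemma foldB_eq (word : String) (lst : List String) (acc : List String) (cnt : Int) :
    lst.foldl (fun (s : List String × Int) element =>
      let cs := element.toList
      if twoPtrPal cs 0 (cs.length - 1) then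
        (s.1 ++ [element], if element == word then s.2 + 1 else s.2)
      else s) (acc, cnt)
    = (acc ++ lst.filter pvIsPal, cnt + ((lst.filter pvIsPal).count word : Int)) := by
  induction lst generalizing acc cnt with
  | nil => simp
  | cons x xs ih =>
    simp only [List.foldl_cons, List.filter_cons, pvIsPal, twoPtrPal_eq_reverse, beq_iff_eq] at *
    by_cases h : x.toList = x.toList.reverse
    · simp only [if_pos h, ih]
      by_cases hw : x = word
      · subst hw; simp; ring
      · simp [hw]
    · simp only [if_neg h, ih]

-- ===== VERDICT =====
theorem find_palindromes_spec : Claim_equal_find_palindromes := by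
  intro lst word _
  unfold Spec_find_palindromes find_palindromes find_palindromes_alt
  rw [foldA_eq, foldB_eq]
  simp [PySem.List.count_eq]
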